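-- pv_equiv track=rewrite | github.com/VitaliiHlapshun/SoftServe | sprint3/task3_possible_solution.py | are_secrets_valid
-- ===== SOURCE A (Python) =====
-- def are_secrets_valid(base_secrets, secrets_to_check):
--     if len(base_secrets) != len(secrets_to_check):
--         return False
--     for word in secrets_to_check:
--         is_valid = False
--         for secret in base_secrets:
--             if len(word) == len(secret):
--                 matched_len = 0
--                 for letter in word:
--                     if letter in secret:
--                         matched_len += 1
--                 # matched_data.append(matched_len)
--                 if matched_len >= len(secret) - 1:
--                     is_valid = True
--                     break
--         if not is_valid:
--             return False
--     return True
-- ===== SOURCE B (Python) =====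
-- def are_secrets_valid(base_secrets, secrets_to_check):
--     if len(base_secrets) != len(secrets_to_check):
--         return False
--     buckets = {}
--     for s in base_secrets:
--         buckets.setdefault(len(s), []).append(s)
--     return all(
--         any(sum(1 for ch in w if ch in s) >= len(s) - 1
--             for s in buckets.get(len(w), []))
--         for w in secrets_to_check
--     )
-- ===== Notes on version B (the rewrite author's own statement) =====
-- stated objective: alternative
-- what changed: B builds a length-indexed dictionary of base_secrets in one pass and checks each word only against the bucket of its own length (via all/any), instead of A's per-word full scan of base_secrets with an explicit is_valid flag and break.
import Mathlib
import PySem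

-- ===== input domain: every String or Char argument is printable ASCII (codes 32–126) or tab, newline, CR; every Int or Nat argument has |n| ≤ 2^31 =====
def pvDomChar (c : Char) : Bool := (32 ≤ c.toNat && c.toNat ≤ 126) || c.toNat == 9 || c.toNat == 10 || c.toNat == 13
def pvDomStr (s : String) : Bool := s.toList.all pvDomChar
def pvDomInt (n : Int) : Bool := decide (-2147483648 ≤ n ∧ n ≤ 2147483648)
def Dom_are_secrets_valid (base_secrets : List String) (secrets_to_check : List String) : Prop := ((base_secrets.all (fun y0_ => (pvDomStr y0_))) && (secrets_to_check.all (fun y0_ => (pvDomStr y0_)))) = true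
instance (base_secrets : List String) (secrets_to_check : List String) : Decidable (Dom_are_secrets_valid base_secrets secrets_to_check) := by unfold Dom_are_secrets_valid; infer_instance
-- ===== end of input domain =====

-- B replaces A's per-word full scan of base_secrets by a one-pass length-indexed
-- dictionary of base_secrets, checking each word only against its own bucket (alternative structure).

-- ===== PORT A =====
-- for letter in word: if letter in secret: matched_len += 1
def pvCountA (word secret : String) : Int :=
  word.toList.foldl (fun matched_len letter =>
    if letter ∈ secret.toList then matched_len + 1 else matched_len) 0

-- inner 'for secret in base_secrets' loop with is_valid / break
def pvInnerA (word : String) : List String → Bool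
  | [] => false
  | secret :: rest =>
    if word.toList.length = secret.toList.length then
      if pvCountA word secret ≥ (secret.toList.length : Int) - 1 then true
      else pvInnerA word rest
    else pvInnerA word rest

-- outer 'for word in secrets_to_check' loop with early 'return False'
def pvOuterA (base_secrets : List String) : List String → Bool
  | [] => true
  | word :: rest =>
    if pvInnerA word base_secrets then pvOuterA base_secrets rest else false

def are_secrets_valid (base_secrets : List String) (secrets_to_check : List String) : Bool :=
  if base_secrets.length ≠ secrets_to_check.length then false
  else pvOuterA base_secrets secrets_to_check

-- ===== PORT B =====
-- sum(1 for ch in w if ch in s)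
def pvCountB (w s : String) : Int :=
  ((w.toList.filter (fun ch => ch ∈ s.toList)).map (fun _ => (1 : Int))).sum

-- buckets.setdefault(len(s), []).append(s) over base_secrets
def pvBuckets (base_secrets : List String) : PySem.Dict Nat (List String) :=
  base_secrets.foldl (fun d s => d.modify s.toList.length [] (· ++ [s])) PySem.Dict.empty

def are_secrets_valid_alt (base_secrets : List String) (secrets_to_check : List String) : Bool :=
  if base_secrets.length ≠ secrets_to_check.length then false
  else
    let buckets := pvBuckets base_secrets
    secrets_to_check.all (fun w =>
      (buckets.getD w.toList.length []).any (fun s =>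
        pvCountB w s ≥ (s.toList.length : Int) - 1))

-- ===== PRECONDITION & SPEC =====
def Spec_are_secrets_valid (base_secrets : List String) (secrets_to_check : List String) (out : Bool) : Prop := out = are_secrets_valid_alt base_secrets secrets_to_check
instance (base_secrets : List String) (secrets_to_check : List String) (out : Bool) : Decidable (Spec_are_secrets_valid base_secrets secrets_to_check out) := by unfold Spec_are_secrets_valid; infer_instance

-- ===== CLAIM (what is proved, stated in full; the proofs are below) =====
def Claim_equal_are_secrets_valid : Prop := ∀ (base_secrets : List String) (secrets_to_check : List String), Dom_are_secrets_valid base_secrets secrets_to_check → Spec_are_secrets_valid base_secrets secrets_to_check (are_secrets_valid base_secrets secrets_to_check)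

-- ===== LEMMAS AND PROOFS =====

-- counting fold = length of the filter
theorem pvFoldCount (p : Char → Prop) [DecidablePred p] (l : List Char) (a : Int) :
    l.foldl (fun m c => if p c then m + 1 else m) a = a + (l.filter (fun c => decide (p c))).length := by
  induction l generalizing a with
  | nil => simp
  | cons c cs ih =>
    simp only [List.foldl_cons, List.filter_cons]
    by_cases h : p c
    · simp [h, ih]; ring
    · simp [h, ih]

-- the two character counts agree
theorem pvCount_eq (w s : String) : pvCountA w s = pvCountB w s := by
  unfold pvCountA pvCountB
  rw [pvFoldCount (fun c => c ∈ s.toList)]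
  induction w.toList.filter (fun c => decide (c ∈ s.toList)) with
  | nil => simp
  | cons c cs ih => simp at ih ⊢; omega

-- the getD of the bucket dict is the length-filter of base_secrets
theorem pvBuckets_getD (bs : List String) (d : PySem.Dict Nat (List String)) (n : Nat) :
    (bs.foldl (fun d s => d.modify s.toList.length [] (· ++ [s])) d).getD n []
      = d.getD n [] ++ bs.filter (fun s => s.toList.length = n) := by
  induction bs generalizing d with
  | nil => simp
  | cons s rest ih =>
    simp only [List.foldl_cons, List.filter_cons]
    rw [ih, PySem.Dict.getD_modify]
    by_cases h : s.length = n
    · simp [h, List.append_assoc]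
    · have h2 : ¬ (n = s.length) := fun e => h e.symm
      simp [h, h2]

-- A's inner loop equals 'any' over the length-filtered list
theorem pvInnerA_eq_filter_any (w : String) (bs : List String) :
    pvInnerA w bs
      = (bs.filter (fun s => s.toList.length = w.toList.length)).any
          (fun s => pvCountB w s ≥ (s.toList.length : Int) - 1) := by
  induction bs with
  | nil => simp [pvInnerA]
  | cons s rest ih =>
    rw [pvInnerA]
    by_cases h : w.toList.length = s.toList.length
    · rw [if_pos h, List.filter_cons_of_pos (by simp [h.symm]), List.any_cons]
      by_cases hc : pvCountA w s ≥ (s.toList.length : Int) - 1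
      · have hc2 : pvCountB w s ≥ (s.toList.length : Int) - 1 := pvCount_eq w s ▸ hc
        rw [if_pos hc]
        simp [ge_iff_le] at hc2 ⊢
        left; omega
      · have hc2 : ¬ pvCountB w s ≥ (s.toList.length : Int) - 1 := fun e => hc (pvCount_eq w s ▸ e)
        rw [if_neg hc, ih]
        simp [ge_iff_le] at hc2 ⊢
        intro hcon
        exact absurd hcon (by omega)
    · have h2 : ¬ (s.toList.length = w.toList.length) := fun e => h e.symm
      rw [if_neg h, List.filter_cons_of_neg (by simpa using h2), ih]

-- A's outer loop equals 'all'
theorem pvOuterA_eq_all (bs : List String) (sc : List String) :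
    pvOuterA bs sc = sc.all (fun w => pvInnerA w bs) := by
  induction sc with
  | nil => simp [pvOuterA]
  | cons w rest ih =>
    rw [pvOuterA, List.all_cons]
    by_cases h : pvInnerA w bs
    · simp [h, ih]
    · simp [h]

-- ===== VERDICT (by name: the statement is the Claim_ definition above) =====
theorem are_secrets_valid_spec : Claim_equal_are_secrets_valid := by
  intro bs sc _
  unfold Spec_are_secrets_valid are_secrets_valid are_secrets_valid_alt
  by_cases hlen : bs.length ≠ sc.length
  · simp [hlen]
  · rw [if_neg hlen, if_neg hlen, pvOuterA_eq_all]
    simp only [pvBuckets]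
    apply congrArg (List.all sc)
    funext w
    rw [pvInnerA_eq_filter_any, pvBuckets_getD]
    simp
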